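-- pv_equiv track=rewrite | github.com/landreman/gx_features | gx_features/utils.py | meaningful_names
-- ===== SOURCE A (Python) =====
-- def meaningful_names(names):
--     """
--     Given a list of GX variable names, return the names in regular physics notation.
--     """
--     new_names = []
--     for n in names:
--         # Note that gbdrift0 must come before gbdrift, and gds21 & gds22 must
--         # come before gds2.
--         n = n.replace("bmag", "B")
--         n = n.replace("gbdrift0_over_shat", "B⁻³𝗕×∇B⋅∇x")
--         n = n.replace("gbdrift", "B⁻³𝗕×∇B⋅∇y")
--         n = n.replace("cvdrift", "B⁻²𝗕×κ⋅∇y")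
--         n = n.replace("gds21_over_shat", "∇x⋅∇y")
--         n = n.replace("gds22_over_shat_squared", "|∇x|²")
--         n = n.replace("gds2", "|∇y|²")
--         n = n.replace("localShear", "S")
--         new_names.append(n)
--
--     return new_names
-- ===== SOURCE B (Python) =====
-- # Table-driven single pass: instead of 8 sequential full-string .replace passes,
-- # scan each name once left to right, trying the patterns most-specific-first at
-- # each position (same precedence A's replace order encodes).
-- _TABLE = [
--     ("bmag", "B"),
--     ("gbdrift0_over_shat", "B⁻³𝗕×∇B⋅∇x"),
--     ("gbdrift", "B⁻³𝗕×∇B⋅∇y"),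
--     ("cvdrift", "B⁻²𝗕×κ⋅∇y"),
--     ("gds21_over_shat", "∇x⋅∇y"),
--     ("gds22_over_shat_squared", "|∇x|²"),
--     ("gds2", "|∇y|²"),
--     ("localShear", "S"),
-- ]
--
--
-- def _translate(s):
--     out = ""
--     i = 0
--     n = len(s)
--     while i < n:
--         for pat, rep in _TABLE:
--             if s.startswith(pat, i):
--                 out += rep
--                 i += len(pat)
--                 break
--         else:
--             out += s[i]
--             i += 1
--     return out
--
--
-- def meaningful_names(names):
--     return [_translate(n) for n in names]
-- ===== Notes on version B (the rewrite author's own statement) =====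
-- stated objective: alternative
-- what changed: Replaces the 8 sequential full-string .replace passes per name with a single left-to-right table-driven scan that tries the patterns most-specific-first at each position and emits the replacement or the original character.
import Mathlib
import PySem

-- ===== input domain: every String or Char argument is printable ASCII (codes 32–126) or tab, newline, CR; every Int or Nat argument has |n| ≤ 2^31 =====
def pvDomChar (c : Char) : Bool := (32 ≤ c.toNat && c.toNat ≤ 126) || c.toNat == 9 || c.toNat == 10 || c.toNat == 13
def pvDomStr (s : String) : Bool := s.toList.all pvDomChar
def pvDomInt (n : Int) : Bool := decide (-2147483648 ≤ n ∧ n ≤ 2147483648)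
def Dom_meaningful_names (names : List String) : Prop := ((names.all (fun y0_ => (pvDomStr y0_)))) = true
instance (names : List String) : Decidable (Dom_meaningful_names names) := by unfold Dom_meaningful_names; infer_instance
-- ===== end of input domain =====

-- B replaces A's 8 sequential full-string .replace passes per name with a single
-- left-to-right table-driven scan (patterns tried most-specific-first at each position);
-- same results, a different traversal (objective: alternative).

-- ===== PORT A =====
def meaningful_names (names : List String) : List String :=
  names.foldl (fun new_names n =>
    let n := PySem.Str.replace n "bmag" "B"
    let n := PySem.Str.replace n "gbdrift0_over_shat" "B⁻³𝗕×∇B⋅∇x"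
    let n := PySem.Str.replace n "gbdrift" "B⁻³𝗕×∇B⋅∇y"
    let n := PySem.Str.replace n "cvdrift" "B⁻²𝗕×κ⋅∇y"
    let n := PySem.Str.replace n "gds21_over_shat" "∇x⋅∇y"
    let n := PySem.Str.replace n "gds22_over_shat_squared" "|∇x|²"
    let n := PySem.Str.replace n "gds2" "|∇y|²"
    let n := PySem.Str.replace n "localShear" "S"
    new_names ++ [n]) []

-- ===== PORT B =====
-- the table _TABLE of Source B
def pvTB : List (List Char × List Char) :=
  [("bmag".toList, "B".toList),
   ("gbdrift0_over_shat".toList, "B⁻³𝗕×∇B⋅∇x".toList),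
   ("gbdrift".toList, "B⁻³𝗕×∇B⋅∇y".toList),
   ("cvdrift".toList, "B⁻²𝗕×κ⋅∇y".toList),
   ("gds21_over_shat".toList, "∇x⋅∇y".toList),
   ("gds22_over_shat_squared".toList, "|∇x|²".toList),
   ("gds2".toList, "|∇y|²".toList),
   ("localShear".toList, "S".toList)]

-- the inner `for pat, rep in _TABLE: if s.startswith(pat, i)` loop (applied to s.drop i)
def pvTryTable : List (List Char × List Char) → List Char → Option (List Char × Nat)
  | [], _ => none
  | (p, r) :: rest, s => if p.isPrefixOf s then some (r, p.length) else pvTryTable rest s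

-- termination helper for pvGo: every pattern in the table is nonempty
theorem pvTryTable_pos (tb : List (List Char × List Char))
    (h1 : ∀ pr ∈ tb, pr.1 ≠ []) (s : List Char) (r : List Char) (k : Nat)
    (h : pvTryTable tb s = some (r, k)) : 1 ≤ k := by
  induction tb with
  | nil => simp [pvTryTable] at h
  | cons a rest ih =>
    obtain ⟨p, rr⟩ := a
    simp only [pvTryTable] at h
    split at h
    · injection h with h'
      injection h' with h1' h2'
      subst h2'
      have := h1 (p, rr) (by simp)
      simpa [Nat.one_le_iff_ne_zero, List.length_eq_zero_iff] using this
    · exact ih (fun pr hpr => h1 pr (List.mem_cons_of_mem _ hpr)) h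

theorem pvTB_fst_ne_nil : ∀ pr ∈ pvTB, pr.1 ≠ [] := by
  intro pr h
  fin_cases h <;> simp

-- the while loop of _translate: out accumulates, i advances
def pvGo (s : List Char) (i : Nat) (out : List Char) : List Char :=
  if h : i < s.length then
    match hm : pvTryTable pvTB (s.drop i) with
    | some (r, k) => pvGo s (i + k) (out ++ r)
    | none => pvGo s (i + 1) (out ++ [s.getD i ' '])   -- s[i]; exact: i < len(s) holds here
  else out
termination_by s.length - i
decreasing_by
· have := pvTryTable_pos pvTB pvTB_fst_ne_nil (s.drop i) r k hm
  omega
· omega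

def meaningful_names_alt (names : List String) : List String :=
  names.map (fun n => String.ofList (pvGo n.toList 0 []))

-- ===== PRECONDITION & SPEC =====
def Spec_meaningful_names (names : List String) (out : List String) : Prop := out = meaningful_names_alt names
instance (names : List String) (out : List String) : Decidable (Spec_meaningful_names names out) := by unfold Spec_meaningful_names; infer_instance

-- ===== CLAIM (what is proved, stated in full; the proofs are below) =====
def Claim_equal_meaningful_names : Prop := ∀ (names : List String), Dom_meaningful_names names → Spec_meaningful_names names (meaningful_names names)

-- ===== LEMMAS AND PROOFS =====

-- structural version of Python's s.replace(p, r) for nonempty p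
def pvRep (p r : List Char) : List Char → List Char
  | [] => []
  | c :: cs =>
    if p.isPrefixOf (c :: cs) then r ++ pvRep p r (cs.drop (p.length - 1))
    else c :: pvRep p r cs
termination_by l => l.length
decreasing_by
all_goals (simp only [List.length_drop, List.length_cons]; omega)

-- the single-pass scan, structurally (pvGo re-expressed; proved equal below)
def pvScan (tb : List (List Char × List Char)) : List Char → List Char
  | [] => []
  | c :: cs =>
    match pvTryTable tb (c :: cs) with
    | some (r, k) => r ++ pvScan tb (cs.drop (k - 1))
    | none => c :: pvScan tb cs
termination_by l => l.length
decreasing_by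
all_goals (simp only [List.length_drop, List.length_cons]; omega)

-- A's per-name computation: the table's replacements applied sequentially
def pvChain (tb : List (List Char × List Char)) (s : List Char) : List Char :=
  tb.foldl (fun t pr => pvRep pr.1 pr.2 t) s

-- relation between an earlier table entry a and a later one b that makes the
-- sequential passes and the single scan agree
def pvRel (a b : List Char × List Char) : Prop :=
  (∀ c ∈ a.2, c ∉ b.1) ∧
  (∀ q < b.1.length, 1 ≤ q → ¬ (b.1.drop q <+: a.1) ∧ ¬ (a.1 <+: b.1.drop q))

-- Bool versions of the table side conditions (decide diverges on the Prop forms)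
def pvRelb (a b : List Char × List Char) : Bool :=
  a.2.all (fun c => !b.1.contains c) &&
  (List.range b.1.length).all (fun q =>
    q == 0 || (!(b.1.drop q).isPrefixOf a.1 && !a.1.isPrefixOf (b.1.drop q)))

def pvPairwiseb : List (List Char × List Char) → Bool
  | [] => true
  | x :: xs => xs.all (pvRelb x) && pvPairwiseb xs

theorem pvRel_of_b (a b : List Char × List Char) (h : pvRelb a b = true) : pvRel a b := by
  simp only [pvRelb, Bool.and_eq_true, List.all_eq_true] at h
  obtain ⟨h1, h2⟩ := h
  constructor
  · intro c hc
    have := h1 c hc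
    simpa using this
  · intro q hq hq1
    have := h2 q (List.mem_range.mpr hq)
    simp only [Bool.or_eq_true, beq_iff_eq, Bool.and_eq_true,
      Bool.not_eq_true'] at this
    rcases this with h0 | ⟨ha, hb⟩
    · omega
    · constructor
      · intro hc
        rw [← List.isPrefixOf_iff_prefix] at hc
        rw [hc] at ha
        cases ha
      · intro hc
        rw [← List.isPrefixOf_iff_prefix] at hc
        rw [hc] at hb
        cases hb

theorem pvPairwise_of_b (tb : List (List Char × List Char))
    (h : pvPairwiseb tb = true) : List.Pairwise pvRel tb := by
  induction tb with
  | nil => simp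
  | cons x xs ih =>
    simp only [pvPairwiseb, Bool.and_eq_true, List.all_eq_true] at h
    exact List.Pairwise.cons (fun b hb => pvRel_of_b x b (h.1 b hb)) (ih h.2)

theorem pvTB_pairwise : List.Pairwise pvRel pvTB :=
  pvPairwise_of_b pvTB (by decide)

theorem pvTB_ne : ∀ pr ∈ pvTB, pr.1 ≠ [] ∧ pr.2 ≠ [] := by
  intro pr h
  fin_cases h <;> simp

-- ---- pvRep facts ----

theorem pvRep_nil (p r : List Char) : pvRep p r [] = [] := by simp [pvRep]

theorem pvRep_fire (p r : List Char) (c : Char) (cs : List Char) (hp : p ≠ [])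
    (h : p <+: c :: cs) :
    pvRep p r (c :: cs) = r ++ pvRep p r ((c :: cs).drop p.length) := by
  have hl : 1 ≤ p.length := by
    cases p with
    | nil => exact absurd rfl hp
    | cons a l => simp
  rw [pvRep, if_pos (List.isPrefixOf_iff_prefix.mpr h)]
  congr 1
  have : (c :: cs).drop p.length = cs.drop (p.length - 1) := by
    cases p with
    | nil => exact absurd rfl hp
    | cons a l => simp
  rw [this]

theorem pvRep_step (p r : List Char) (c : Char) (cs : List Char)
    (h : ¬ p <+: c :: cs) :
    pvRep p r (c :: cs) = c :: pvRep p r cs := by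
  rw [pvRep, if_neg (by simpa [List.isPrefixOf_iff_prefix] using h)]

-- replace = pvRep (nonempty pattern)
theorem pvReplaceGo_eq (p r : List Char) (hp : p ≠ []) :
    ∀ (fuel : Nat) (l acc : List Char), l.length ≤ fuel →
      PySem.Chars.replace.go p r fuel l acc = acc.reverse ++ pvRep p r l := by
  intro fuel
  induction fuel with
  | zero =>
    intro l acc hl
    have : l = [] := by
      cases l with
      | nil => rfl
      | cons a t => simp at hl
    subst this
    rw [PySem.Chars.replace.go]
    simp [pvRep_nil]
  | succ fuel ih =>
    intro l acc hl
    cases l with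
    | nil =>
      rw [PySem.Chars.replace.go]
      simp [pvRep_nil]
      omega
    | cons c t =>
      rw [PySem.Chars.replace.go]
      by_cases h : p.isPrefixOf (c :: t)
      · simp only [h, if_true]
        have hplen : 1 ≤ p.length := by
          cases p with
          | nil => exact absurd rfl hp
          | cons a l => simp
        rw [ih (List.drop p.length (c :: t)) (r.reverse ++ acc) (by simp only [List.length_drop, List.length_cons]; simp only [List.length_cons] at hl; omega)]
        rw [pvRep_fire p r c t hp (List.isPrefixOf_iff_prefix.mp h)]
        simp
      · simp only [h, if_false, Bool.false_eq_true]
        rw [ih t (c :: acc) (by simpa using Nat.le_of_succ_le_succ hl)]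
        rw [pvRep_step p r c t (fun hpre => h (List.isPrefixOf_iff_prefix.mpr hpre))]
        simp

theorem pvReplace_eq (p r s : List Char) (hp : p ≠ []) :
    PySem.Chars.replace s p r = pvRep p r s := by
  rw [PySem.Chars.replace]
  simp only [List.isEmpty_iff]
  rw [if_neg hp]
  simpa using pvReplaceGo_eq p r hp s.length s [] (le_refl _)

-- ---- non-interference lemmas for a single pass ----

-- a prefix σ disjoint from the replacement chars of a pass survives it backwards
theorem pvRep_peel (p r : List Char) (hp : p ≠ []) (hr : r ≠ []) :
    ∀ (m : Nat) (u : List Char), u.length ≤ m → ∀ (σ : List Char), σ ≠ [] →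
      (∀ c ∈ r, c ∉ σ) → σ <+: pvRep p r u → σ <+: u := by
  intro m
  induction m with
  | zero =>
    intro u hu σ hσ hd h
    have hnil : u = [] := by
      cases u with
      | nil => rfl
      | cons a t => simp at hu
    subst hnil
    simpa [pvRep_nil] using h
  | succ m ih =>
    intro u hu σ hσ hd h
    cases u with
    | nil => simpa [pvRep_nil] using h
    | cons c cs =>
      by_cases hf : p <+: c :: cs
      · rw [pvRep_fire p r c cs hp hf] at h
        exfalso
        cases r with
        | nil => exact hr rfl
        | cons d r' =>
          cases σ with
          | nil => exact hσ rfl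
          | cons c₀ σ' =>
            rw [List.cons_append, List.cons_prefix_cons] at h
            exact hd d (by simp) (by simp [← h.1])
      · rw [pvRep_step p r c cs hf] at h
        cases σ with
        | nil => exact absurd rfl hσ
        | cons c₀ σ' =>
          rw [List.cons_prefix_cons] at h ⊢
          refine ⟨h.1, ?_⟩
          cases σ' with
          | nil => simp
          | cons d σ'' =>
            exact ih cs (by simpa using Nat.le_of_succ_le_succ hu) (d :: σ'')
              (by simp) (fun c' hc' hmem => hd c' hc' (by simp [hmem]))
              h.2

-- a pass slides over a leading block whose chars avoid the pattern
theorem pvRep_transparent (p r : List Char) (hp : p ≠ []) :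
    ∀ (v t : List Char), (∀ c ∈ v, c ∉ p) →
      pvRep p r (v ++ t) = v ++ pvRep p r t := by
  intro v
  induction v with
  | nil => simp
  | cons c v' ih =>
    intro t hv
    have hnm : ¬ p <+: c :: (v' ++ t) := by
      intro hpre
      cases p with
      | nil => exact hp rfl
      | cons d p' =>
        rw [List.cons_prefix_cons] at hpre
        exact hv c (by simp) (by simp [hpre.1])
    rw [List.cons_append, pvRep_step p r _ _ hnm,
      ih t (fun c' hc' => hv c' (by simp [hc']))]
    simp

-- a pass slides over a leading block v when the pattern cannot match at any offset of v
theorem pvRep_pres (p r : List Char) (v t : List Char)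
    (h0 : ¬ p <+: v ++ t)
    (hq : ∀ q < v.length, 1 ≤ q → ¬ (v.drop q <+: p) ∧ ¬ (p <+: v.drop q)) :
    pvRep p r (v ++ t) = v ++ pvRep p r t := by
  induction v generalizing t with
  | nil => simp
  | cons c v' ih =>
    rw [List.cons_append, pvRep_step p r _ _ (by simpa using h0)]
    cases v' with
    | nil => simp
    | cons d v'' =>
      have h1 := hq 1 (by simp) (le_refl 1)
      simp only [List.drop_one, List.tail_cons] at h1
      have hnext : ¬ p <+: (d :: v'') ++ t := by
        intro hpre
        by_cases hlen : p.length ≤ (d :: v'').length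
        · exact h1.2 (List.prefix_of_prefix_length_le hpre (List.prefix_append _ _) hlen)
        · exact h1.1 (List.prefix_of_prefix_length_le (List.prefix_append _ _) hpre (by omega))
      have hq' : ∀ q < (d :: v'').length, 1 ≤ q →
          ¬ ((d :: v'').drop q <+: p) ∧ ¬ (p <+: (d :: v'').drop q) := by
        intro q hql hq1
        have := hq (q + 1) (by simpa using Nat.succ_lt_succ hql) (by omega)
        simpa using this
      rw [ih _ hnext hq']
      simp

-- ---- chain lemmas ----

theorem pvChain_cons (p r : List Char) (rest : List (List Char × List Char)) (s : List Char) :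
    pvChain ((p, r) :: rest) s = pvChain rest (pvRep p r s) := rfl

theorem pvChain_nil (tb : List (List Char × List Char))
    (h1 : ∀ pr ∈ tb, pr.1 ≠ []) : pvChain tb [] = [] := by
  induction tb with
  | nil => rfl
  | cons a rest ih =>
    obtain ⟨p, r⟩ := a
    rw [pvChain_cons, pvRep_nil]
    exact ih (fun pr hpr => h1 pr (List.mem_cons_of_mem _ hpr))

theorem pvChain_transparent (tb : List (List Char × List Char)) (v : List Char)
    (h1 : ∀ pr ∈ tb, pr.1 ≠ [])
    (hd : ∀ pr ∈ tb, ∀ c ∈ v, c ∉ pr.1) :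
    ∀ w, pvChain tb (v ++ w) = v ++ pvChain tb w := by
  induction tb with
  | nil => intro w; simp [pvChain]
  | cons a rest ih =>
    obtain ⟨p, r⟩ := a
    intro w
    rw [pvChain_cons, pvRep_transparent p r (h1 (p, r) (by simp)) v w (hd (p, r) (by simp)),
      ih (fun pr hpr => h1 pr (List.mem_cons_of_mem _ hpr))
        (fun pr hpr => hd pr (List.mem_cons_of_mem _ hpr)) (pvRep p r w),
      pvChain_cons]

theorem pvChain_nomatch (tb : List (List Char × List Char)) (c : Char)
    (h1 : ∀ pr ∈ tb, pr.1 ≠ [] ∧ pr.2 ≠ [])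
    (hpair : List.Pairwise (fun a b => ∀ x ∈ a.2, x ∉ b.1) tb) :
    ∀ cs, (∀ pr ∈ tb, ¬ pr.1 <+: c :: cs) →
      pvChain tb (c :: cs) = c :: pvChain tb cs := by
  induction tb with
  | nil => intro cs _; simp [pvChain]
  | cons a rest ih =>
    obtain ⟨p, r⟩ := a
    intro cs hnm
    rw [pvChain_cons, pvRep_step p r c cs (hnm (p, r) (by simp))]
    have hrest : ∀ pr ∈ rest, ¬ pr.1 <+: c :: pvRep p r cs := by
      intro pr hpr hpre
      cases hq : pr.1 with
      | nil => exact (h1 pr (List.mem_cons_of_mem _ hpr)).1 hq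
      | cons c₀ σ =>
        rw [hq, List.cons_prefix_cons] at hpre
        cases σ with
        | nil =>
          exact hnm pr (List.mem_cons_of_mem _ hpr)
            (by rw [hq, hpre.1]; simp [List.cons_prefix_cons])
        | cons d σ' =>
          have hσcs : (d :: σ') <+: cs := by
            refine pvRep_peel p r (h1 (p, r) (by simp)).1 (h1 (p, r) (by simp)).2
              cs.length cs (le_refl _) (d :: σ') (by simp) ?_ hpre.2
            intro x hx hmem
            exact (List.pairwise_cons.mp hpair).1 pr hpr x hx (by rw [hq]; simp [hmem])
          exact hnm pr (List.mem_cons_of_mem _ hpr)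
            (by rw [hq, hpre.1, List.cons_prefix_cons]; exact ⟨rfl, hσcs⟩)
    rw [ih (fun pr hpr => h1 pr (List.mem_cons_of_mem _ hpr))
      (List.pairwise_cons.mp hpair).2 (pvRep p r cs) hrest]
    rw [pvChain_cons]

theorem pvChain_pres (tb : List (List Char × List Char)) (v : List Char)
    (h1 : ∀ pr ∈ tb, pr.1 ≠ [] ∧ pr.2 ≠ [])
    (hpair : List.Pairwise (fun a b => ∀ x ∈ a.2, x ∉ b.1) tb)
    (hov : ∀ pr ∈ tb, ∀ q < v.length, 1 ≤ q → ¬ (v.drop q <+: pr.1) ∧ ¬ (pr.1 <+: v.drop q)) :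
    ∀ t, (∀ pr ∈ tb, ¬ pr.1 <+: v ++ t) →
      pvChain tb (v ++ t) = v ++ pvChain tb t := by
  induction tb with
  | nil => intro t _; simp [pvChain]
  | cons a rest ih =>
    obtain ⟨p, r⟩ := a
    intro t hnm
    rw [pvChain_cons, pvRep_pres p r v t (hnm (p, r) (by simp))
      (hov (p, r) (by simp))]
    have hrest : ∀ pr ∈ rest, ¬ pr.1 <+: v ++ pvRep p r t := by
      intro pr hpr hpre
      by_cases hlen : pr.1.length ≤ v.length
      · have hv : pr.1 <+: v := List.prefix_of_prefix_length_le hpre (List.prefix_append _ _) hlen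
        exact hnm pr (List.mem_cons_of_mem _ hpr) (hv.trans (List.prefix_append _ _))
      · have hvp : v <+: pr.1 :=
          List.prefix_of_prefix_length_le (List.prefix_append _ _) hpre (by omega)
        have hsplit : pr.1 = v ++ pr.1.drop v.length := List.prefix_append_drop hvp
        have hσne : pr.1.drop v.length ≠ [] := by
          intro hnil
          have := congrArg List.length hnil
          simp at this
          omega
        have hσ : pr.1.drop v.length <+: pvRep p r t := by
          rw [hsplit] at hpre
          exact (List.prefix_append_right_inj v).mp hpre
        have hσt : pr.1.drop v.length <+: t := by
          refine pvRep_peel p r (h1 (p, r) (by simp)).1 (h1 (p, r) (by simp)).2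
            t.length t (le_refl _) _ hσne ?_ hσ
          intro x hx hmem
          exact (List.pairwise_cons.mp hpair).1 pr hpr x hx (List.mem_of_mem_drop hmem)
        refine hnm pr (List.mem_cons_of_mem _ hpr) ?_
        rw [hsplit]
        exact (List.prefix_append_right_inj v).mpr hσt
    rw [ih (fun pr hpr => h1 pr (List.mem_cons_of_mem _ hpr))
      (List.pairwise_cons.mp hpair).2
      (fun pr hpr => hov pr (List.mem_cons_of_mem _ hpr)) (pvRep p r t) hrest]
    rw [pvChain_cons]

-- ---- pvTryTable characterizations ----

theorem pvTryTable_none (tb : List (List Char × List Char)) (s : List Char)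
    (h : pvTryTable tb s = none) : ∀ pr ∈ tb, ¬ pr.1 <+: s := by
  induction tb with
  | nil => simp
  | cons a rest ih =>
    obtain ⟨p, r⟩ := a
    simp only [pvTryTable] at h
    split at h
    · exact absurd h (by simp)
    · intro pr hpr
      rcases List.mem_cons.mp hpr with hh | hh
      · subst hh
        simpa [List.isPrefixOf_iff_prefix] using ‹¬ p.isPrefixOf s = true›
      · exact ih h pr hh

theorem pvTryTable_some (tb : List (List Char × List Char)) (s : List Char)
    (r : List Char) (k : Nat) (h : pvTryTable tb s = some (r, k)) :
    ∃ tb₁ p tb₂, tb = tb₁ ++ (p, r) :: tb₂ ∧ p <+: s ∧ k = p.length ∧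
      ∀ pr ∈ tb₁, ¬ pr.1 <+: s := by
  induction tb with
  | nil => simp [pvTryTable] at h
  | cons a rest ih =>
    obtain ⟨p', r'⟩ := a
    simp only [pvTryTable] at h
    split at h
    · injection h with h'
      injection h' with e1 e2
      subst e1; subst e2
      exact ⟨[], p', rest, by simp, List.isPrefixOf_iff_prefix.mp ‹_›, rfl, by simp⟩
    · obtain ⟨tb₁, p, tb₂, he, hp, hk, hn⟩ := ih h
      refine ⟨(p', r') :: tb₁, p, tb₂, by simp [he], hp, hk, ?_⟩
      intro pr hpr
      rcases List.mem_cons.mp hpr with hh | hh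
      · subst hh
        simpa [List.isPrefixOf_iff_prefix] using ‹¬ p'.isPrefixOf s = true›
      · exact hn pr hh

-- ---- the main equivalence: sequential passes = single scan ----

theorem pvMain (tb : List (List Char × List Char))
    (h1 : ∀ pr ∈ tb, pr.1 ≠ [] ∧ pr.2 ≠ [])
    (hpair : List.Pairwise pvRel tb) :
    ∀ (m : Nat) (s : List Char), s.length ≤ m → pvChain tb s = pvScan tb s := by
  intro m
  induction m with
  | zero =>
    intro s hs
    have : s = [] := by cases s with
      | nil => rfl
      | cons a t => simp at hs
    subst this
    rw [pvChain_nil tb (fun pr hpr => (h1 pr hpr).1)]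
    simp [pvScan]
  | succ m ih =>
    intro s hs
    cases s with
    | nil =>
      rw [pvChain_nil tb (fun pr hpr => (h1 pr hpr).1)]
      simp [pvScan]
    | cons c cs =>
      cases hm : pvTryTable tb (c :: cs) with
      | none =>
        have hnm := pvTryTable_none tb (c :: cs) hm
        rw [pvChain_nomatch tb c h1 (hpair.imp (fun hab => hab.1)) cs hnm]
        rw [ih cs (by simpa using Nat.le_of_succ_le_succ hs)]
        rw [pvScan]
        rw [hm]
      | some rk =>
        obtain ⟨r, k⟩ := rk
        obtain ⟨tb₁, p, tb₂, he, hp, hk, hn⟩ := pvTryTable_some tb (c :: cs) r k hm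
        have hpne : p ≠ [] := (h1 (p, r) (by rw [he]; simp)).1
        have hplen : 1 ≤ p.length := by
          cases p with
          | nil => exact absurd rfl hpne
          | cons a l => simp
        have hsplit : c :: cs = p ++ (c :: cs).drop p.length := List.prefix_append_drop hp
        set t := (c :: cs).drop p.length with ht
        -- pairwise pieces
        rw [he] at hpair h1
        have hpair₁ : List.Pairwise pvRel tb₁ := (List.pairwise_append.mp hpair).1
        have hpair₂ : List.Pairwise pvRel ((p, r) :: tb₂) := (List.pairwise_append.mp hpair).2.1
        have hcross : ∀ a ∈ tb₁, pvRel a (p, r) :=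
          fun a ha => (List.pairwise_append.mp hpair).2.2 a ha (p, r) (by simp)
        have h1₁ : ∀ pr ∈ tb₁, pr.1 ≠ [] ∧ pr.2 ≠ [] :=
          fun pr hpr => h1 pr (by simp [hpr])
        have h1₂ : ∀ pr ∈ tb₂, pr.1 ≠ [] ∧ pr.2 ≠ [] :=
          fun pr hpr => h1 pr (by simp [hpr])
        -- compute the chain
        have step1 : pvChain tb₁ (c :: cs) = p ++ pvChain tb₁ t := by
          rw [hsplit]
          exact pvChain_pres tb₁ p h1₁ (hpair₁.imp (fun hab => hab.1))
            (fun pr hpr q hq hq1 => (hcross pr hpr).2 q hq hq1)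
            t (by rw [← hsplit]; exact hn)
        have step2 : pvRep p r (p ++ pvChain tb₁ t) = r ++ pvRep p r (pvChain tb₁ t) := by
          cases hc : p ++ pvChain tb₁ t with
          | nil => exact absurd (List.append_eq_nil_iff.mp hc).1 hpne
          | cons d ds =>
            rw [← hc, hc]
            rw [pvRep_fire p r d ds hpne (by rw [← hc]; exact List.prefix_append _ _)]
            rw [← hc, List.drop_left]
        have step3 : pvChain tb₂ (r ++ pvRep p r (pvChain tb₁ t))
            = r ++ pvChain tb₂ (pvRep p r (pvChain tb₁ t)) := by
          refine pvChain_transparent tb₂ r (fun pr hpr => (h1₂ pr hpr).1) ?_ _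
          intro pr hpr x hx
          exact ((List.pairwise_cons.mp hpair₂).1 pr hpr).1 x hx
        have hchain : pvChain (tb₁ ++ (p, r) :: tb₂) (c :: cs)
            = r ++ pvChain (tb₁ ++ (p, r) :: tb₂) t := by
          unfold pvChain
          rw [List.foldl_append, List.foldl_append]
          show pvChain ((p, r) :: tb₂) (pvChain tb₁ (c :: cs))
            = r ++ pvChain ((p, r) :: tb₂) (pvChain tb₁ t)
          rw [step1, pvChain_cons, step2, step3, pvChain_cons]
        rw [← he] at hchain
        rw [hchain]
        have htlen : t.length ≤ m := by
          have hlen : t.length = (c :: cs).length - p.length := by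
            rw [ht, List.length_drop]
          simp only [List.length_cons] at hlen hs
          omega
        rw [ih t htlen]
        -- now compute the scan side
        rw [pvScan, hm]
        have hdt : cs.drop (k - 1) = t := by
          rw [ht, hk]
          cases p with
          | nil => exact absurd rfl hpne
          | cons a l => simp
        show r ++ pvScan tb t = r ++ pvScan tb (List.drop (k - 1) cs)
        rw [hdt]

-- ---- assembling the two ports ----

-- A's per-name pipeline
def pvAper (n : String) : String :=
  let n := PySem.Str.replace n "bmag" "B"
  let n := PySem.Str.replace n "gbdrift0_over_shat" "B⁻³𝗕×∇B⋅∇x"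
  let n := PySem.Str.replace n "gbdrift" "B⁻³𝗕×∇B⋅∇y"
  let n := PySem.Str.replace n "cvdrift" "B⁻²𝗕×κ⋅∇y"
  let n := PySem.Str.replace n "gds21_over_shat" "∇x⋅∇y"
  let n := PySem.Str.replace n "gds22_over_shat_squared" "|∇x|²"
  let n := PySem.Str.replace n "gds2" "|∇y|²"
  PySem.Str.replace n "localShear" "S"

theorem pvAper_toList (n : String) : (pvAper n).toList = pvChain pvTB n.toList := by
  show (pvAper n).toList = pvChain pvTB n.toList
  simp only [pvAper, PySem.Str.toList_replace]
  rw [pvReplace_eq _ _ _ (by decide), pvReplace_eq _ _ _ (by decide),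
    pvReplace_eq _ _ _ (by decide), pvReplace_eq _ _ _ (by decide),
    pvReplace_eq _ _ _ (by decide), pvReplace_eq _ _ _ (by decide),
    pvReplace_eq _ _ _ (by decide), pvReplace_eq _ _ _ (by decide)]
  rfl

theorem pvGo_eq (s : List Char) :
    ∀ (m : Nat) (i : Nat) (out : List Char), s.length - i ≤ m →
      pvGo s i out = out ++ pvScan pvTB (s.drop i) := by
  intro m
  induction m with
  | zero =>
    intro i out h
    rw [pvGo]
    rw [dif_neg (by omega)]
    have : s.drop i = [] := List.drop_eq_nil_of_le (by omega)
    rw [this]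
    simp [pvScan]
  | succ m ih =>
    intro i out h
    by_cases hi : i < s.length
    · have hdrop : s.drop i = s[i] :: s.drop (i + 1) := List.drop_eq_getElem_cons hi
      rw [pvGo, dif_pos hi]
      cases hm : pvTryTable pvTB (s.drop i) with
      | none =>
        simp only
        rw [ih (i + 1) (out ++ [s.getD i ' ']) (by omega)]
        rw [hdrop] at hm ⊢
        rw [pvScan, hm]
        simp [List.getElem?_eq_getElem hi]
      | some rk =>
        obtain ⟨r, k⟩ := rk
        simp only
        have hk1 : 1 ≤ k := pvTryTable_pos pvTB pvTB_fst_ne_nil (s.drop i) r k hm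
        rw [ih (i + k) (out ++ r) (by omega)]
        rw [hdrop] at hm
        rw [hdrop, pvScan, hm]
        have : (s.drop (i + 1)).drop (k - 1) = s.drop (i + k) := by
          rw [List.drop_drop]
          congr 1
          omega
        show out ++ r ++ pvScan pvTB (List.drop (i + k) s)
          = out ++ (r ++ pvScan pvTB (List.drop (k - 1) (List.drop (i + 1) s)))
        rw [this]
        simp
    · rw [pvGo, dif_neg hi]
      have : s.drop i = [] := List.drop_eq_nil_of_le (by omega)
      rw [this]
      simp [pvScan]

theorem pv_per_name (n : String) :
    pvAper n = String.ofList (pvGo n.toList 0 []) := by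
  apply String.toList_inj.mp
  rw [pvAper_toList]
  rw [pvGo_eq n.toList n.toList.length 0 [] (by omega)]
  rw [pvMain pvTB pvTB_ne pvTB_pairwise n.toList.length n.toList (le_refl _)]
  simp

-- ===== VERDICT (by name: the statement is the Claim_ definition above) =====
theorem meaningful_names_spec : Claim_equal_meaningful_names := by
  intro names _
  unfold Spec_meaningful_names meaningful_names meaningful_names_alt
  rw [show (fun (new_names : List String) (n : String) =>
      let n := PySem.Str.replace n "bmag" "B"
      let n := PySem.Str.replace n "gbdrift0_over_shat" "B⁻³𝗕×∇B⋅∇x"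
      let n := PySem.Str.replace n "gbdrift" "B⁻³𝗕×∇B⋅∇y"
      let n := PySem.Str.replace n "cvdrift" "B⁻²𝗕×κ⋅∇y"
      let n := PySem.Str.replace n "gds21_over_shat" "∇x⋅∇y"
      let n := PySem.Str.replace n "gds22_over_shat_squared" "|∇x|²"
      let n := PySem.Str.replace n "gds2" "|∇y|²"
      let n := PySem.Str.replace n "localShear" "S"
      new_names ++ [n]) = (fun new_names n => new_names ++ [pvAper n]) from rfl]
  rw [PySem.List.foldl_append_singleton_eq_map pvAper names []]
  simp only [List.nil_append]
  exact List.map_congr_left (fun n _ => pv_per_name n)
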